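-- pv_equiv track=rewrite | github.com/BoyaZhangNB/Bibintell | ai_engine/reasoning_agent.py | is_educational_domain
-- ===== SOURCE A (Python) =====
-- EDUCATIONAL_DOMAINS = [
--     "chatgpt.com",
--     "gemini.google.com",
--     "claude.ai",
--     "quizlet.com",
--     "knowt.com",
--     "brainscape.com",
--     "ankiweb.net",
--     "jstor.org",
--     "refseek.com",
--     "chegg.com",
--     "brainly.com",
--     "khanacademy.org",
--     "wolframalpha.com",
--     "desmos.com",
--     "coursera.org",
--     "edx.org",
--     "udemy.com",
--     "skillshare.com",
--     "codecademy.com",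
--     "freecodecamp.org",
--     "w3schools.com",
--     "notion.so",
--     "grammarly.com",
--     "evernote.com",
--     "docs.google.com",
--     "scholar.google.com",
--     "arxiv.org",
--     "wikipedia.org",
--     "youtube.com",
-- ]
--
-- def is_educational_domain(domain: str) -> bool:
--     normalized = (domain or "").lower().strip()
--     if not normalized:
--         return False
--
--     return any(
--         normalized == candidate or normalized.endswith(f".{candidate}")
--         for candidate in EDUCATIONAL_DOMAINS
--     )
-- ===== SOURCE B (Python) =====
-- EDUCATIONAL_DOMAINS = [
--     "chatgpt.com",
--     "gemini.google.com",
--     "claude.ai",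
--     "quizlet.com",
--     "knowt.com",
--     "brainscape.com",
--     "ankiweb.net",
--     "jstor.org",
--     "refseek.com",
--     "chegg.com",
--     "brainly.com",
--     "khanacademy.org",
--     "wolframalpha.com",
--     "desmos.com",
--     "coursera.org",
--     "edx.org",
--     "udemy.com",
--     "skillshare.com",
--     "codecademy.com",
--     "freecodecamp.org",
--     "w3schools.com",
--     "notion.so",
--     "grammarly.com",
--     "evernote.com",
--     "docs.google.com",
--     "scholar.google.com",
--     "arxiv.org",
--     "wikipedia.org",
--     "youtube.com",
-- ]
--
-- _EDU_SET = set(EDUCATIONAL_DOMAINS)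
--
-- def is_educational_domain(domain: str) -> bool:
--     normalized = (domain or "").lower().strip()
--     if not normalized:
--         return False
--     if normalized in _EDU_SET:
--         return True
--     return any(ch == "." and normalized[i + 1:] in _EDU_SET
--                for i, ch in enumerate(normalized))
-- ===== Notes on version B (the rewrite author's own statement) =====
-- stated objective: alternative
-- what changed: Instead of scanning all 29 candidate domains testing equality/endswith, B builds a set of the candidates once and makes one pass over the normalized input, looking the tail after each dot (and the whole string) up in the set.
import Mathlib
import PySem

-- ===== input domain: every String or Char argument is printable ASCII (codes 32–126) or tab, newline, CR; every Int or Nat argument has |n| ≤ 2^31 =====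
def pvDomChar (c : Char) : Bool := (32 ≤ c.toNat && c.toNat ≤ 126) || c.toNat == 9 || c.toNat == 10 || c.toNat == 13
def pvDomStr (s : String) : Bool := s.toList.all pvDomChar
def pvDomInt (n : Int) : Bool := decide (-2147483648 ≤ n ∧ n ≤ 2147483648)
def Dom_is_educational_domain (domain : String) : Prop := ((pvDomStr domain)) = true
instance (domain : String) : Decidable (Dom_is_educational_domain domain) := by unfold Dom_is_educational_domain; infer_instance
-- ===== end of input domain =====

-- B replaces A's scan of all 29 candidates with `endswith` by a single pass over the
-- input's own dot positions, looking each tail up in a set of the candidates (alternative decomposition).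
-- ===== PORT A =====
def EDUCATIONAL_DOMAINS : List String := ["chatgpt.com", "gemini.google.com", "claude.ai", "quizlet.com", "knowt.com", "brainscape.com", "ankiweb.net", "jstor.org", "refseek.com", "chegg.com", "brainly.com", "khanacademy.org", "wolframalpha.com", "desmos.com", "coursera.org", "edx.org", "udemy.com", "skillshare.com", "codecademy.com", "freecodecamp.org", "w3schools.com", "notion.so", "grammarly.com", "evernote.com", "docs.google.com", "scholar.google.com", "arxiv.org", "wikipedia.org", "youtube.com"]

def is_educational_domain (domain : String) : Bool :=
  -- normalized = (domain or "").lower().strip()  ('domain or ""' is the identity on str)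
  let normalized : List Char := PySem.Chars.strip (PySem.Chars.lower domain.toList)
  if normalized = [] then false
  else EDUCATIONAL_DOMAINS.any (fun candidate =>
    normalized == candidate.toList || PySem.Chars.endswith normalized ('.' :: candidate.toList))

-- ===== PORT B =====
def eduSet : PySem.Set (List Char) := PySem.Set.ofList (EDUCATIONAL_DOMAINS.map String.toList)

def is_educational_domain_alt (domain : String) : Bool :=
  let normalized : List Char := PySem.Chars.strip (PySem.Chars.lower domain.toList)
  if normalized = [] then false
  else if PySem.Set.contains eduSet normalized then true
  else (PySem.List.enumerate normalized).any (fun p =>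
    -- normalized[i + 1:] with i ≥ 0 is the slice from i+1
    p.2 == '.' && PySem.Set.contains eduSet (PySem.List.slice normalized (some (p.1 + 1)) none))

-- ===== PRECONDITION & SPEC =====
def Spec_is_educational_domain (domain : String) (out : Bool) : Prop := out = is_educational_domain_alt domain
instance (domain : String) (out : Bool) : Decidable (Spec_is_educational_domain domain out) := by unfold Spec_is_educational_domain; infer_instance

-- ===== CLAIM (what is proved, stated in full; the proofs are below) =====
def Claim_equal_is_educational_domain : Prop := ∀ (domain : String), Dom_is_educational_domain domain → Spec_is_educational_domain domain (is_educational_domain domain)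

-- ===== LEMMAS AND PROOFS =====

-- A list ends with '.'::c exactly when some position k holds '.' and the tail after it is c.
theorem dot_suffix_iff (c n : List Char) :
    ('.' :: c) <:+ n ↔ ∃ k : Nat, ∃ _ : k < n.length, n[k]? = some '.' ∧ n.drop (k + 1) = c := by
  constructor
  · rintro ⟨p, rfl⟩
    refine ⟨p.length, by simp, ?_, ?_⟩
    · simp
    · simp [List.drop_length_add_append]
  · rintro ⟨k, hk, hget, hdrop⟩
    refine ⟨n.take k, ?_⟩
    have h1 : n[k] = '.' := by
      have := List.getElem?_eq_getElem hk
      rw [hget] at this; exact (Option.some_inj.mp this).symm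
    calc n.take k ++ '.' :: c = n.take k ++ n[k] :: n.drop (k + 1) := by rw [h1, hdrop]
      _ = n := by rw [← List.drop_eq_getElem_cons hk, List.take_append_drop]

-- both loops test the same set of tails
theorem any_eq_key (n : List Char) :
    (EDUCATIONAL_DOMAINS.any (fun candidate =>
      n == candidate.toList || PySem.Chars.endswith n ('.' :: candidate.toList)))
    = (PySem.Set.contains eduSet n ||
       (PySem.List.enumerate n).any (fun p =>
         p.2 == '.' && PySem.Set.contains eduSet (PySem.List.slice n (some (p.1 + 1)) none))) := by
  rw [Bool.eq_iff_iff]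
  simp only [List.any_eq_true, Bool.or_eq_true, Bool.and_eq_true, beq_iff_eq,
    PySem.Chars.endswith_iff, PySem.Set.contains_iff, eduSet, PySem.Set.mem_ofList,
    List.mem_map, PySem.List.mem_enumerate_iff, dot_suffix_iff]
  constructor
  · rintro ⟨c, hc, hcase⟩
    rcases hcase with heq | ⟨k, hk, hget, hdrop⟩
    · exact Or.inl ⟨c, hc, heq.symm⟩
    · refine Or.inr ⟨((k : Int), n[k]), ⟨k, hk, by simp⟩, ?_, ?_⟩
      · have := List.getElem?_eq_getElem hk
        rw [hget] at this; exact (Option.some_inj.mp this).symm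
      · refine ⟨c, hc, ?_⟩
        have : ((k : Int) + 1) = ((k + 1 : Nat) : Int) := by push_cast; ring
        rw [this, PySem.List.slice_from_natCast, hdrop]
  · rintro (⟨c, hc, heq⟩ | ⟨p, ⟨k, hk, rfl⟩, hdot, c, hc, hsl⟩)
    · exact ⟨c, hc, Or.inl heq.symm⟩
    · refine ⟨c, hc, Or.inr ⟨k, hk, ?_, ?_⟩⟩
      · simp only at hdot
        simp [List.getElem?_eq_getElem hk, hdot]
      · have h1 : ((0 : Int) + (k : Int) + 1) = ((k + 1 : Nat) : Int) := by push_cast; ring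
        simp only [h1, PySem.List.slice_from_natCast] at hsl
        exact hsl.symm

-- ===== VERDICT (by name: the statement is the Claim_ definition above) =====
theorem is_educational_domain_spec : Claim_equal_is_educational_domain := by
  intro domain _
  unfold Spec_is_educational_domain is_educational_domain is_educational_domain_alt
  by_cases h : PySem.Chars.strip (PySem.Chars.lower domain.toList) = []
  · simp [h]
  · simp only [if_neg h]
    rw [any_eq_key]
    cases hc : PySem.Set.contains eduSet (PySem.Chars.strip (PySem.Chars.lower domain.toList)) <;> simp
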